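-- pv_equiv track=rewrite | github.com/RamezEssam/aoc-2023 | day3/main.py | fetchDigits
-- ===== SOURCE A (Python) =====
-- def fetchDigits(x,y, grid):
--     rows = len(grid[0])
--     set_of_numbers = {'0', '1', '2', '3', '4', '5', '6', '7', '8', '9'}
--     visited_indices = set()
--
--     middle_part = grid[y][x]
--     left_part = ''
--     right_part = ''
--     visited_indices.add(x)
--     for i in reversed(range(0, x)):
--         if grid[y][i] in set_of_numbers:
--             visited_indices.add(i)
--             left_part = ''.join([grid[y][i], left_part])
--         else:
--             break
--     for i in range(x+1, rows):
--         if grid[y][i] in set_of_numbers: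
--             visited_indices.add(i)
--             right_part = ''.join([right_part, grid[y][i]])
--         else:
--             break
--     number = int(''.join([left_part, middle_part, right_part]))
--     return (number, visited_indices)
-- ===== SOURCE B (Python) =====
-- def fetchDigits(x, y, grid):
--     rows = len(grid[0])
--     row = grid[y]
--     digits = {'0', '1', '2', '3', '4', '5', '6', '7', '8', '9'}
--     # Tokenize the row once: collect every maximal run of digit cells in row[0:rows].
--     runs = []
--     i = 0
--     while i < rows:
--         if row[i] in digits:
--             j = i + 1
--             while j < rows and row[j] in digits:
--                 j += 1
--             runs.append((i, j))
--             i = j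
--         else:
--             i += 1
--     # The answer is the one run containing column x.
--     for s, e in runs:
--         if s <= x < e:
--             return (int(''.join(row[s:e])), set(range(s, e)))
-- ===== Notes on version B (the rewrite author's own statement) =====
-- stated objective: alternative
-- what changed: Instead of expanding locally leftwards and rightwards from (x,y) with two break-loops, B tokenizes the whole row once into maximal runs of digit cells and returns the int and index set of the single run containing column x.
-- outside the precondition, e.g. on fetchDigits(0, 0, [['+', '5']]): A returns (5, {0, 1}), B returns None; on fetchDigits(0, 1, [['1', '2', '3'], ['4', '.']]): A returns (4, {0}), B raises IndexError; on fetchDigits(-1, 0, [['5', '7']]): A returns (757, {0, 1, -1}), B returns None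
import Mathlib
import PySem

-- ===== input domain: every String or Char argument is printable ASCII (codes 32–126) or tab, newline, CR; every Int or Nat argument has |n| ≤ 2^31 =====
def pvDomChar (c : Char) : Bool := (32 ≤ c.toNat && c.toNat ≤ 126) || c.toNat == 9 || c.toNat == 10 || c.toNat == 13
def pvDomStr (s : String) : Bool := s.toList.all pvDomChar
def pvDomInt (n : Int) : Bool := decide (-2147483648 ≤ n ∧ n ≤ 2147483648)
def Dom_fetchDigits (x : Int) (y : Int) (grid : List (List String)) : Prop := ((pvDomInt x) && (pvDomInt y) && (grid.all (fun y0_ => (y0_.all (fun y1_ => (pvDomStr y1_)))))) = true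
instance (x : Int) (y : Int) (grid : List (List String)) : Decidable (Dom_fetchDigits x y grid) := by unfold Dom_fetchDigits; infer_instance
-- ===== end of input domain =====

-- B tokenizes the row into maximal digit-cell runs once and picks the run containing x,
-- instead of A's local left/right expansion from (x,y); same exact return value on Pre_.


-- ===== PORT A =====
def pvSetOfNumbers : List String := ["0", "1", "2", "3", "4", "5", "6", "7", "8", "9"]

-- A's left loop: 'for i in reversed(range(0, x))' with break; fuel n counts down, i = n-1.
-- visited_indices is a Python SET (unordered); we keep its elements as a list in ascending
-- index order: this loop conses i to the front (exactly mirroring the prepend to left_part),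
-- the right loop appends, and x sits in between — same elements, canonical representation.
def pvLeftLoop (row : List String) (acc : String) (vis : List Int) : Nat → String × List Int
  | 0 => (acc, vis)
  | n + 1 =>
    let c := PySem.List.pyGetD row (n : Int) ""
    if c ∈ pvSetOfNumbers then
      pvLeftLoop row (PySem.Str.join "" [c, acc]) ((n : Int) :: vis) n
    else (acc, vis)

-- A's right loop: 'for i in range(x+1, rows)' with break, over the materialized range.
def pvRightLoop (row : List String) (acc : String) (vis : List Int) : List Int → String × List Int
  | [] => (acc, vis)
  | i :: rest =>
    let c := PySem.List.pyGetD row i ""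
    if c ∈ pvSetOfNumbers then
      pvRightLoop row (PySem.Str.join "" [acc, c]) (vis ++ [i]) rest
    else (acc, vis)

def fetchDigits (x : Int) (y : Int) (grid : List (List String)) : Int × List Int :=
  let rows : Int := (((PySem.List.pyGet? grid 0).getD []).length : Int)
  let row := (PySem.List.pyGet? grid y).getD []
  let middle := PySem.List.pyGetD row x ""
  let lp := pvLeftLoop row "" [] x.toNat
  let rp := pvRightLoop row "" [] (PySem.List.pyRange (x + 1) rows 1)
  let number := (PySem.Int.ofStr? (PySem.Str.join "" [lp.1, middle, rp.1])).getD 0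
  (number, lp.2 ++ x :: rp.2)

-- ===== PORT B =====
def pvDigitsB : List String := ["0", "1", "2", "3", "4", "5", "6", "7", "8", "9"]

-- Source B's inner while: starting from j, advance while j < rows and row[j] is a digit cell.
def pvRunEnd (row : List String) (rows : Nat) (j : Nat) : Nat :=
  if h : j < rows ∧ PySem.List.pyGetD row (j : Int) "" ∈ pvDigitsB then
    pvRunEnd row rows (j + 1)
  else j
termination_by rows - j
decreasing_by omega

theorem pvRunEnd_ge (row : List String) (rows : Nat) (j : Nat) : j ≤ pvRunEnd row rows j := by
  rw [pvRunEnd]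
  split
  · exact le_trans (Nat.le_succ j) (pvRunEnd_ge row rows (j + 1))
  · exact le_refl j
termination_by rows - j
decreasing_by omega

-- Source B's outer while: collect all maximal digit runs of row[0:rows].
def pvRuns (row : List String) (rows : Nat) (i : Nat) : List (Nat × Nat) :=
  if h : i < rows then
    if PySem.List.pyGetD row (i : Int) "" ∈ pvDigitsB then
      (i, pvRunEnd row rows (i + 1)) :: pvRuns row rows (pvRunEnd row rows (i + 1))
    else pvRuns row rows (i + 1)
  else []
termination_by rows - i
decreasing_by
  · have := pvRunEnd_ge row rows (i + 1); omega
  · omega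

def fetchDigits_alt (x : Int) (y : Int) (grid : List (List String)) : Int × List Int :=
  let rows := ((PySem.List.pyGet? grid 0).getD []).length
  let row := (PySem.List.pyGet? grid y).getD []
  match (pvRuns row rows 0).find? (fun p => decide ((p.1 : Int) ≤ x ∧ x < (p.2 : Int))) with
  | some (s, e) =>
      ((PySem.Int.ofStr? (PySem.Str.join "" (PySem.List.slice row (some (s : Int)) (some (e : Int))))).getD 0,
       PySem.Set.ofList (PySem.List.pyRange (s : Int) (e : Int) 1))
  | none => (0, [])  -- Python B returns None here; unreachable under Pre_

-- ===== PRECONDITION & SPEC =====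
-- Pre_ restricts to the function's natural domain (an AoC grid of single-character cells,
-- row index in Python's accepted range, column index nonneg): -len(grid) ≤ y < len(grid),
-- 0 ≤ x < len(grid[0]) ≤ len(grid[y]), and the focused cell grid[y][x] is a single digit
-- character.  A also happens to return outside this domain — on exotic int-parsable cells
-- like '+5' with no digit neighbours, on ragged rows whose scan breaks before the short row
-- ends, and on negative/overflowing x via Python index wraparound — where B returns no value
-- (None or IndexError); those inputs are excluded (see claim cites).
def Pre_fetchDigits (x : Int) (y : Int) (grid : List (List String)) : Prop :=
  PySem.Raise.InRange grid.length y ∧ 0 ≤ x ∧ x < ((grid.getD 0 []).length : Int) ∧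
  (grid.getD 0 []).length ≤ ((PySem.List.pyGet? grid y).getD []).length ∧
  ((PySem.List.pyGet? grid y).getD []).getD x.toNat "" ∈ (["0", "1", "2", "3", "4", "5", "6", "7", "8", "9"] : List String)
instance (x : Int) (y : Int) (grid : List (List String)) : Decidable (Pre_fetchDigits x y grid) := by
  unfold Pre_fetchDigits; infer_instance

def pvWitness_fetchDigits : Int × Int × List (List String) := (1, 0, [["1", "2", "3"]])

def Spec_fetchDigits (x : Int) (y : Int) (grid : List (List String)) (out : Int × List Int) : Prop := out = fetchDigits_alt x y grid
instance (x : Int) (y : Int) (grid : List (List String)) (out : Int × List Int) : Decidable (Spec_fetchDigits x y grid out) := by unfold Spec_fetchDigits; infer_instance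

-- ===== CLAIM (what is proved, stated in full; the proofs are below) =====
def Claim_equal_fetchDigits : Prop := ∀ (x : Int) (y : Int) (grid : List (List String)), Dom_fetchDigits x y grid → Pre_fetchDigits x y grid → Spec_fetchDigits x y grid (fetchDigits x y grid)

-- ===== LEMMAS AND PROOFS =====

theorem pvIntercalateNil (l : List (List Char)) : List.intercalate [] l = l.flatten := by
  induction l with
  | nil => rfl
  | cons h t ih =>
    cases t with
    | nil => simp [List.intercalate]
    | cons h2 t2 =>
      simp [List.intercalate, List.intersperse] at ih ⊢
      simpa using ih

theorem pvJoinEq (parts : List String) :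
    PySem.Str.join "" parts = String.ofList ((parts.map String.toList).flatten) := by
  simp [PySem.Str.join, PySem.Chars.join, pvIntercalateNil]

theorem pvJoin2 (a b : String) :
    PySem.Str.join "" [a, b] = String.ofList (a.toList ++ b.toList) := by
  simp [pvJoinEq]

theorem pvJoin3 (a b c : String) :
    PySem.Str.join "" [a, b, c] = String.ofList (a.toList ++ b.toList ++ c.toList) := by
  simp [pvJoinEq]

-- whether cell k of the row is a (single-character) digit cell
def pvDig (row : List String) (k : Nat) : Bool := decide (row.getD k "" ∈ pvDigitsB)

-- start of the digit run ending at n, scanning down (mirrors A's left loop)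
def pvLst (row : List String) : Nat → Nat
  | 0 => 0
  | n + 1 => if pvDig row n then pvLst row n else n + 1

-- the indices s, s+1, …, e-1 as Ints, and the concatenated characters of those cells
def pvIdxs (s e : Nat) : List Int := (List.range' s (e - s)).map (fun k : Nat => (k : Int))
def pvChars (row : List String) (s e : Nat) : List Char :=
  ((List.range' s (e - s)).map (fun k => (row.getD k "").toList)).flatten

-- pvLst facts
theorem pvLst_le (row : List String) (n : Nat) : pvLst row n ≤ n := by
  induction n with
  | zero => exact le_refl 0
  | succ m ih => rw [pvLst]; split <;> omega

theorem pvLst_digits (row : List String) (n : Nat) :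
    ∀ k, pvLst row n ≤ k → k < n → pvDig row k = true := by
  induction n with
  | zero => omega
  | succ m ih =>
    intro k h1 h2
    rw [pvLst] at h1
    by_cases hd : pvDig row m
    · rw [if_pos hd] at h1
      rcases Nat.lt_succ_iff_lt_or_eq.mp h2 with h | h
      · exact ih k h1 h
      · subst h; exact hd
    · rw [if_neg hd] at h1; omega

theorem pvLst_boundary (row : List String) (n : Nat) :
    pvLst row n = 0 ∨ pvDig row (pvLst row n - 1) = false := by
  induction n with
  | zero => exact Or.inl rfl
  | succ m ih =>
    rw [pvLst]
    by_cases hd : pvDig row m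
    · rw [if_pos hd]; exact ih
    · rw [if_neg hd]; right; simpa using hd

-- pvRunEnd facts
theorem pvRunEnd_le (row : List String) (rows : Nat) (j : Nat) (h : j ≤ rows) :
    pvRunEnd row rows j ≤ rows := by
  rw [pvRunEnd]
  split
  · next hc => exact pvRunEnd_le row rows (j + 1) hc.1
  · exact h
termination_by rows - j
decreasing_by omega

theorem pvRunEnd_absorb (row : List String) (rows : Nat) (j : Nat)
    (h1 : j < rows) (h2 : pvDig row j = true) :
    pvRunEnd row rows j = pvRunEnd row rows (j + 1) := by
  rw [pvRunEnd, dif_pos]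
  exact ⟨h1, by simpa [pvDig] using h2⟩

theorem pvRunEnd_stop (row : List String) (rows : Nat) (j : Nat)
    (h : ¬(j < rows ∧ pvDig row j = true)) : pvRunEnd row rows j = j := by
  rw [pvRunEnd, dif_neg]
  intro hc
  exact h ⟨hc.1, by simpa [pvDig] using hc.2⟩

theorem pvRunEnd_chain (row : List String) (rows : Nat) (j m : Nat) (hjm : j ≤ m)
    (hall : ∀ k, j ≤ k → k < m → pvDig row k = true ∧ k < rows) :
    pvRunEnd row rows j = pvRunEnd row rows m := by
  rcases Nat.eq_or_lt_of_le hjm with h | h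
  · rw [h]
  · have hj := hall j (le_refl j) h
    rw [pvRunEnd_absorb row rows j hj.2 hj.1]
    exact pvRunEnd_chain row rows (j + 1) m h (fun k hk1 hk2 => hall k (by omega) hk2)
termination_by m - j
decreasing_by omega

theorem pvRunEnd_le_stop (row : List String) (rows : Nat) (m : Nat) (hm : pvDig row m = false)
    (j : Nat) (hj : j ≤ m) : pvRunEnd row rows j ≤ m := by
  rw [pvRunEnd]
  split
  · next hc =>
    have hjm : j ≠ m := by
      intro h; subst h
      have : pvDig row j = true := by simpa [pvDig] using hc.2
      rw [this] at hm; exact Bool.noConfusion hm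
    exact pvRunEnd_le_stop row rows m hm (j + 1) (by omega)
  · exact hj
termination_by m - j
decreasing_by omega

-- segment identities
theorem pvIdxs_self (s : Nat) : pvIdxs s s = [] := by simp [pvIdxs]
theorem pvChars_self (row : List String) (s : Nat) : pvChars row s s = [] := by simp [pvChars]

theorem pvIdxs_split (s m e : Nat) (h1 : s ≤ m) (h2 : m ≤ e) :
    pvIdxs s e = pvIdxs s m ++ pvIdxs m e := by
  unfold pvIdxs
  have h := @List.range'_append s (m - s) (e - m) 1
  simp only [one_mul] at h
  rw [show s + (m - s) = m by omega, show (m - s) + (e - m) = e - s by omega] at h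
  rw [← h, List.map_append]

theorem pvChars_split (row : List String) (s m e : Nat) (h1 : s ≤ m) (h2 : m ≤ e) :
    pvChars row s e = pvChars row s m ++ pvChars row m e := by
  unfold pvChars
  have h := @List.range'_append s (m - s) (e - m) 1
  simp only [one_mul] at h
  rw [show s + (m - s) = m by omega, show (m - s) + (e - m) = e - s by omega] at h
  rw [← h, List.map_append, List.flatten_append]

theorem pvIdxs_single (m : Nat) : pvIdxs m (m + 1) = [(m : Int)] := by simp [pvIdxs]

theorem pvChars_single (row : List String) (m : Nat) :
    pvChars row m (m + 1) = (row.getD m "").toList := by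
  simp [pvChars]

-- A's left loop computes the run segment [pvLst n, n)
theorem pvLeftLoop_spec (row : List String) (n : Nat) :
    ∀ acc vis, pvLeftLoop row acc vis n =
      (String.ofList (pvChars row (pvLst row n) n ++ acc.toList),
       pvIdxs (pvLst row n) n ++ vis) := by
  induction n with
  | zero =>
    intro acc vis
    simp [pvLeftLoop, pvLst, pvChars_self, pvIdxs_self, String.ofList_toList]
  | succ m ih =>
    intro acc vis
    rw [pvLeftLoop]
    simp only [PySem.List.pyGetD_natCast]
    by_cases hd : pvDig row m
    · have hmem : row.getD m "" ∈ pvSetOfNumbers := by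
        simpa [pvDig, pvDigitsB, pvSetOfNumbers] using hd
      rw [if_pos hmem, ih, show pvLst row (m + 1) = pvLst row m from by rw [pvLst, if_pos hd]]
      rw [pvChars_split row (pvLst row m) m (m + 1) (pvLst_le row m) (Nat.le_succ m),
          pvChars_single, pvIdxs_split (pvLst row m) m (m + 1) (pvLst_le row m) (Nat.le_succ m),
          pvIdxs_single, pvJoin2, String.toList_ofList]
      simp
    · have hmem : row.getD m "" ∉ pvSetOfNumbers := by
        simpa [pvDig, pvDigitsB, pvSetOfNumbers] using hd
      rw [if_neg hmem, show pvLst row (m + 1) = m + 1 from by rw [pvLst, if_neg hd]]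
      simp [pvChars_self, pvIdxs_self, String.ofList_toList]

-- A's right loop computes the run segment [j, pvRunEnd j)
theorem pvRightLoop_spec (row : List String) (rows : Nat) (j : Nat) (hj : j ≤ rows)
    (acc : String) (vis : List Int) :
    pvRightLoop row acc vis (PySem.List.pyRange (j : Int) (rows : Int) 1) =
      (String.ofList (acc.toList ++ pvChars row j (pvRunEnd row rows j)),
       vis ++ pvIdxs j (pvRunEnd row rows j)) := by
  rcases Nat.eq_or_lt_of_le hj with h | h
  · rw [h, PySem.List.pyRange_one_eq_nil (le_refl _), pvRightLoop,
        pvRunEnd_stop row rows rows (fun hc => absurd hc.1 (lt_irrefl _))]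
    simp [pvChars_self, pvIdxs_self, String.ofList_toList]
  · rw [PySem.List.pyRange_one_cons (by exact_mod_cast h), pvRightLoop]
    simp only [PySem.List.pyGetD_natCast]
    by_cases hd : pvDig row j
    · have hmem : row.getD j "" ∈ pvSetOfNumbers := by
        simpa [pvDig, pvDigitsB, pvSetOfNumbers] using hd
      rw [if_pos hmem, show ((j : Int) + 1) = ((j + 1 : Nat) : Int) by push_cast; ring]
      rw [pvRightLoop_spec row rows (j + 1) (by omega), pvRunEnd_absorb row rows j h hd]
      have hend : j + 1 ≤ pvRunEnd row rows (j + 1) := pvRunEnd_ge row rows (j + 1)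
      rw [pvChars_split row j (j + 1) (pvRunEnd row rows (j + 1)) (Nat.le_succ j) hend,
          pvChars_single, pvIdxs_split j (j + 1) (pvRunEnd row rows (j + 1)) (Nat.le_succ j) hend,
          pvIdxs_single, pvJoin2, String.toList_ofList]
      simp
    · have hmem : row.getD j "" ∉ pvSetOfNumbers := by
        simpa [pvDig, pvDigitsB, pvSetOfNumbers] using hd
      rw [if_neg hmem, pvRunEnd_stop row rows j (by simp [hd])]
      simp [pvChars_self, pvIdxs_self, String.ofList_toList]
termination_by rows - j
decreasing_by omega

-- B's run list contains exactly one run covering x = n, namely [pvLst n, pvRunEnd (n+1))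
theorem pvRunsFind (row : List String) (rows : Nat) (n : Nat)
    (hn : n < rows) (hdig : pvDig row n = true) (i : Nat) (hi : i ≤ pvLst row n) :
    (pvRuns row rows i).find? (fun p => decide ((p.1 : Int) ≤ (n : Int) ∧ (n : Int) < (p.2 : Int)))
      = some (pvLst row n, pvRunEnd row rows (n + 1)) := by
  have hlstn := pvLst_le row n
  have hir : i < rows := by omega
  rw [pvRuns, dif_pos hir]
  rcases Nat.eq_or_lt_of_le hi with heq | hlt
  · -- i is the run start: its run is exactly [pvLst n, pvRunEnd (n+1)) and covers n
    have hdigi : pvDig row i = true := by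
      rcases Nat.eq_or_lt_of_le (heq ▸ hlstn) with h | h
      · rwa [h]
      · exact pvLst_digits row n i (le_of_eq heq.symm) h
    rw [if_pos (show PySem.List.pyGetD row (i : Int) "" ∈ pvDigitsB by
          simpa [pvDig, PySem.List.pyGetD_natCast] using hdigi)]
    have hchain : pvRunEnd row rows (i + 1) = pvRunEnd row rows (n + 1) := by
      apply pvRunEnd_chain row rows (i + 1) (n + 1) (by omega)
      intro k hk1 hk2
      refine ⟨?_, by omega⟩
      rcases Nat.eq_or_lt_of_le (Nat.lt_succ_iff.mp hk2) with h | h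
      · rwa [h]
      · exact pvLst_digits row n k (by omega) h
    rw [hchain, heq]
    apply List.find?_cons_of_pos
    have hend : n + 1 ≤ pvRunEnd row rows (n + 1) := pvRunEnd_ge row rows (n + 1)
    simp only [decide_eq_true_eq]
    constructor
    · exact_mod_cast hlstn
    · exact_mod_cast (by omega : n < pvRunEnd row rows (n + 1))
  · -- i is strictly left of the run start
    by_cases hdigi : pvDig row i
    · -- a digit run that ends strictly before pvLst n (the cell pvLst n - 1 is not a digit)
      have hb : pvDig row (pvLst row n - 1) = false := by
        rcases pvLst_boundary row n with h | h
        · omega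
        · exact h
      have hine : i ≠ pvLst row n - 1 := by
        intro h; rw [h, hb] at hdigi; exact Bool.noConfusion hdigi
      have hstop : pvRunEnd row rows (i + 1) ≤ pvLst row n - 1 :=
        pvRunEnd_le_stop row rows (pvLst row n - 1) hb (i + 1) (by omega)
      rw [if_pos (show PySem.List.pyGetD row (i : Int) "" ∈ pvDigitsB by
            simpa [pvDig, PySem.List.pyGetD_natCast] using hdigi)]
      rw [List.find?_cons_of_neg]
      · exact pvRunsFind row rows n hn hdig (pvRunEnd row rows (i + 1)) (by omega)
      · simp only [decide_eq_true_eq, not_and, not_lt]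
        intro _
        exact_mod_cast (by omega : pvRunEnd row rows (i + 1) ≤ n)
    · rw [if_neg (show PySem.List.pyGetD row (i : Int) "" ∉ pvDigitsB by
            simpa [pvDig, PySem.List.pyGetD_natCast] using hdigi)]
      exact pvRunsFind row rows n hn hdig (i + 1) (by omega)
termination_by rows - i
decreasing_by
  · have := pvRunEnd_ge row rows (i + 1); omega
  · omega

-- row[s:e] concatenated is pvChars s e
theorem pvDropTake (row : List String) : ∀ s m : Nat, s + m ≤ row.length →
    (row.drop s).take m = (List.range' s m).map (fun k => row.getD k "") := by
  intro s m
  induction m generalizing s with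
  | zero => simp
  | succ p ih =>
    intro h
    have hs : s < row.length := by omega
    rw [List.range'_succ, List.map_cons, ← ih (s + 1) (by omega)]
    rw [List.drop_eq_getElem_cons hs, List.take_succ_cons, List.getD_eq_getElem row "" hs]

theorem pvSliceChars (row : List String) (s e : Nat) (he : e ≤ row.length) :
    ((PySem.List.slice row (some (s : Int)) (some (e : Int))).map String.toList).flatten
      = pvChars row s e := by
  rw [PySem.List.slice_natCast]
  rcases Nat.le_total s e with h | h
  · rw [pvDropTake row s (e - s) (by omega), pvChars, List.map_map]
    rfl
  · rw [show e - s = 0 by omega]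
    simp [pvChars, show e - s = 0 by omega]

-- set(range(s, e)) is pvIdxs s e
theorem pvSetRange (s e : Nat) :
    PySem.Set.ofList (PySem.List.pyRange (s : Int) (e : Int) 1) = pvIdxs s e := by
  rw [PySem.Set.ofList_eq_self_of_nodup _ (PySem.List.nodup_pyRange_one _ _)]
  rw [PySem.List.pyRange_one, pvIdxs, List.range'_eq_map_range, List.map_map]
  rw [show ((e : Int) - (s : Int)).toNat = e - s by omega]
  apply List.map_congr_left
  intro k _
  simp [Function.comp]

-- ===== VERDICT (by name: the statement is the Claim_ definition above) =====
theorem fetchDigits_spec : Claim_equal_fetchDigits := by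
  intro x y grid _ hpre
  obtain ⟨_, hx0, hxlt, hrl, hmem⟩ := hpre
  unfold Spec_fetchDigits
  set n := x.toNat with hn
  have hx : x = (n : Int) := by omega
  set row := (PySem.List.pyGet? grid y).getD [] with hrow
  set R := (grid.getD 0 []).length with hR
  have hnR : n < R := by omega
  have h0 : (PySem.List.pyGet? grid 0).getD [] = grid.getD 0 [] := by
    rw [show (0 : Int) = ((0 : Nat) : Int) from rfl, PySem.List.pyGet?_natCast]
    simp [List.getD]
  have hyget : (PySem.List.pyGet? grid y).getD [] = row := rfl
  have hdign : pvDig row n = true := by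
    simp only [pvDig, pvDigitsB, decide_eq_true_eq]
    exact hmem
  have hs := pvLst_le row n
  have hE1 : n + 1 ≤ pvRunEnd row R (n + 1) := pvRunEnd_ge row R (n + 1)
  have hER : pvRunEnd row R (n + 1) ≤ R := pvRunEnd_le row R (n + 1) (by omega)
  set s := pvLst row n with hsdef
  set E := pvRunEnd row R (n + 1) with hEdef
  have hch : pvChars row s n ++ ((row.getD n "").toList ++ pvChars row (n + 1) E)
      = pvChars row s E := by
    rw [pvChars_split row s n E hs (by omega),
        pvChars_split row n (n + 1) E (Nat.le_succ n) hE1, pvChars_single]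
  have hix : pvIdxs s n ++ (n : Int) :: pvIdxs (n + 1) E = pvIdxs s E := by
    rw [pvIdxs_split s n E hs (by omega),
        pvIdxs_split n (n + 1) E (Nat.le_succ n) hE1, pvIdxs_single]
    simp
  have hA : fetchDigits x y grid =
      ((PySem.Int.ofStr? (String.ofList (pvChars row s E))).getD 0, pvIdxs s E) := by
    simp only [fetchDigits, h0, hyget]
    rw [show PySem.List.pyGetD row x "" = row.getD n "" by rw [hx]; simp]
    rw [show x.toNat = n from rfl, pvLeftLoop_spec row n]
    rw [show x + 1 = ((n + 1 : Nat) : Int) by omega,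
        pvRightLoop_spec row R (n + 1) (by omega)]
    rw [pvJoin3]
    simp only [String.toList_ofList]
    rw [show ("" : String).toList = [] from rfl]
    simp only [List.append_nil, List.nil_append]
    rw [List.append_assoc, hch, hx, hix]
  have hB : fetchDigits_alt x y grid =
      ((PySem.Int.ofStr? (String.ofList (pvChars row s E))).getD 0, pvIdxs s E) := by
    simp only [fetchDigits_alt, h0, hyget]
    rw [hx, pvRunsFind row R n hnR hdign 0 (Nat.zero_le _)]
    dsimp only
    rw [pvJoinEq, pvSliceChars row s E (by omega), pvSetRange]
  rw [hA, hB]
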